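-- pv_equiv track=rewrite | github.com/salmanrazzaq-94/4D-Magnus | home.py | get_color_map
-- ===== SOURCE A (Python) =====
-- def get_color_map(option_scores):
--     sorted_options = sorted(option_scores.items(), key=lambda x: x[1], reverse=True)  # Sort descending by score
--     color_map = {}
--     for option, score in sorted_options:
--         if score == sorted_options[0][1]:
--             color_map[option] = 'green'
--         elif score == sorted_options[-1][1]:
--             color_map[option] = 'red'
--         else:
--             color_map[option] = 'orange'
--     return color_map
-- ===== SOURCE B (Python) =====
-- def get_color_map(option_scores):
--     # Bucket options by score (one pass), then sort only the distinct scores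
--     # descending and color whole buckets positionally: first bucket green,
--     # last bucket red (green wins when there is a single bucket), rest orange.
--     buckets = {}
--     for option, score in option_scores.items():
--         buckets.setdefault(score, []).append(option)
--     scores_desc = sorted(buckets, reverse=True)
--     last = len(scores_desc) - 1
--     color_map = {}
--     for i, score in enumerate(scores_desc):
--         color = 'green' if i == 0 else ('red' if i == last else 'orange')
--         for option in buckets[score]:
--             color_map[option] = color
--     return color_map
-- ===== Notes on version B (the rewrite author's own statement) =====
-- stated objective: alternative
-- what changed: A stable-sorts all n items by score and classifies each item by comparing against the first/last sorted score; B never sorts the items: it buckets options by score in one pass, sorts only the distinct scores descending, and colors whole buckets by position (first bucket green, last red, middle orange), producing the identical dict including insertion order.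
import Mathlib
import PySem

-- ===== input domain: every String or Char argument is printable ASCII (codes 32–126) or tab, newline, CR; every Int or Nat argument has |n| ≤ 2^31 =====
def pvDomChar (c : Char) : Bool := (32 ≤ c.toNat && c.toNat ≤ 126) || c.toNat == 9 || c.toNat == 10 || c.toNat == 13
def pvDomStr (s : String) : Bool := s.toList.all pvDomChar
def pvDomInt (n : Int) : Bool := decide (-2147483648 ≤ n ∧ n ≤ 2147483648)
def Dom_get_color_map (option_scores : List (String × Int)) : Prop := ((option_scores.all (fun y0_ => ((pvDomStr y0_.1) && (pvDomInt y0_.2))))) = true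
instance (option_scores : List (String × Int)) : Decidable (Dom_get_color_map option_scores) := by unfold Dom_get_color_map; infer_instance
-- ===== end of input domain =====

-- B replaces A's stable sort of all items (plus per-item first/last comparisons) by bucketing
-- options per score and sorting only the distinct scores; same dict, same insertion order.


-- ===== PORT A =====
-- 'sorted_options[0][1]' / 'sorted_options[-1][1]' are ported with pyGet? (none = IndexError);
-- inside the loop the list is nonempty, so the option is always `some` there.
def get_color_map (option_scores : List (String × Int)) : List (String × String) :=
  let sorted_options := PySem.List.sorted option_scores (fun x => x.2) true
  (sorted_options.foldl (fun (color_map : PySem.Dict String String) p =>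
      if (PySem.List.pyGet? sorted_options 0).map (fun q => q.2) == some p.2 then
        color_map.insert p.1 "green"
      else if (PySem.List.pyGet? sorted_options (-1)).map (fun q => q.2) == some p.2 then
        color_map.insert p.1 "red"
      else
        color_map.insert p.1 "orange") (PySem.Dict.mk [])).items

-- ===== PORT B =====
-- 'buckets.setdefault(score, []).append(option)' = overwrite the bucket in place with the
-- appended list (PySem.Dict.insert overwrites in place, appends new keys at the end).
def get_color_map_alt (option_scores : List (String × Int)) : List (String × String) :=
  let buckets := option_scores.foldl
      (fun (b : PySem.Dict Int (List String)) p => b.insert p.2 (b.getD p.2 [] ++ [p.1]))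
      (PySem.Dict.mk [])
  let scores_desc := PySem.List.sorted buckets.keys (fun s => s) true
  let last : Int := (scores_desc.length : Int) - 1
  ((PySem.List.enumerate scores_desc).foldl
      (fun (color_map : PySem.Dict String String) is =>
        let color := if is.1 = 0 then "green" else if is.1 = last then "red" else "orange"
        (buckets.getD is.2 []).foldl (fun cm o => cm.insert o color) color_map)
      (PySem.Dict.mk [])).items

-- ===== PRECONDITION & SPEC =====
-- The List (String × Int) argument models a Python dict, whose keys are necessarily distinct;
-- Pre_ states exactly that (it excludes no input that corresponds to a Python dict).
def Pre_get_color_map (option_scores : List (String × Int)) : Prop :=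
  (option_scores.map Prod.fst).Nodup
instance (option_scores : List (String × Int)) : Decidable (Pre_get_color_map option_scores) := by
  unfold Pre_get_color_map; infer_instance
def pvWitness_get_color_map : (List (String × Int)) := [("a", 3), ("b", 1), ("c", 2), ("d", 3)]
def Spec_get_color_map (option_scores : List (String × Int)) (out : List (String × String)) : Prop := out = get_color_map_alt option_scores
instance (option_scores : List (String × Int)) (out : List (String × String)) : Decidable (Spec_get_color_map option_scores out) := by unfold Spec_get_color_map; infer_instance

-- ===== CLAIM (what is proved, stated in full; the proofs are below) =====
def Claim_equal_get_color_map : Prop := ∀ (option_scores : List (String × Int)), Dom_get_color_map option_scores → Pre_get_color_map option_scores → Spec_get_color_map option_scores (get_color_map option_scores)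

-- ===== LEMMAS AND PROOFS =====

def pvG (xs : List (String × Int)) (s : Int) : List (String × Int) :=
  xs.filter (fun q => q.2 == s)
def pvD (xs : List (String × Int)) : List Int :=
  PySem.List.sorted (PySem.List.dedup (xs.map Prod.snd)) (fun s => s) true
def pvBf (a b : String × Int) : Bool := decide (b.2 < a.2)
def pvBfI (a b : Int) : Bool := decide (b < a)
def pvBuckets (xs : List (String × Int)) : PySem.Dict Int (List String) :=
  xs.foldl (fun b p => b.insert p.2 (b.getD p.2 [] ++ [p.1])) (PySem.Dict.mk [])

theorem pv_insertBy_skip {α : Type} (before : α → α → Bool) (x : α) (l1 l2 : List α)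
    (h : ∀ y ∈ l1, before x y = false) :
    PySem.List.insertBy before x (l1 ++ l2) = l1 ++ PySem.List.insertBy before x l2 := by
  induction l1 with
  | nil => simp
  | cons a t ih =>
      simp only [List.cons_append, PySem.List.insertBy, h a (by simp)]
      simp only [Bool.false_eq_true, if_false]
      rw [ih (fun y hy => h y (by simp [hy]))]
theorem pv_insertBy_front {α : Type} (before : α → α → Bool) (x : α) (l : List α)
    (h : ∀ y ∈ l, before x y = true) :
    PySem.List.insertBy before x l = x :: l := by
  cases l with
  | nil => rfl
  | cons a t => simp [PySem.List.insertBy, h a (by simp)]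

theorem pv_core_mem (ds : List Int) (G : Int → List (String × Int)) (p : String × Int)
    (hds : ds.Pairwise (· > ·))
    (hkey : ∀ s ∈ ds, ∀ q ∈ G s, q.2 = s)
    (hp : p.2 ∈ ds) :
    PySem.List.insertBy pvBf p (ds.flatMap G)
      = ds.flatMap (fun s => if s = p.2 then G s ++ [p] else G s) := by
  induction ds with
  | nil => cases hp
  | cons d t ih =>
      have hdt : ∀ s ∈ t, s < d := fun s hs => List.rel_of_pairwise_cons hds hs
      simp only [List.flatMap_cons]
      by_cases hpd : p.2 = d
      · have h1 : ∀ y ∈ G d, pvBf p y = false := by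
          intro y hy
          have h2 := hkey d (by simp) y hy
          simp [pvBf, h2, hpd]
        rw [pv_insertBy_skip _ _ _ _ h1]
        have h2 : ∀ y ∈ t.flatMap G, pvBf p y = true := by
          intro y hy
          obtain ⟨s, hs, hys⟩ := List.mem_flatMap.1 hy
          have h3 := hkey s (by simp [hs]) y hys
          have hlt : s < d := hdt s hs
          simp [pvBf, h3, hpd]; omega
        rw [pv_insertBy_front _ _ _ h2]
        rw [if_pos hpd.symm]
        have h3 : t.flatMap (fun s => if s = p.2 then G s ++ [p] else G s) = t.flatMap G := by
          apply List.flatMap_congr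
          intro s hs
          rw [if_neg]
          intro h
          have := hdt s hs
          exact absurd (h.trans hpd) this.ne
        rw [h3]; simp
      · have hpt : p.2 ∈ t := by rcases List.mem_cons.1 hp with h | h; exact absurd h hpd; exact h
        have h1 : ∀ y ∈ G d, pvBf p y = false := by
          intro y hy
          have h2 := hkey d (by simp) y hy
          have : p.2 < d := hdt _ hpt
          simp [pvBf, h2]; omega
        rw [pv_insertBy_skip _ _ _ _ h1,
          ih (hds.sublist (List.sublist_cons_self d t)) (fun s hs => hkey s (by simp [hs])) hpt,
          if_neg (fun h => hpd h.symm)]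

theorem pv_core_new (ds : List Int) (G : Int → List (String × Int)) (p : String × Int)
    (hds : ds.Pairwise (· > ·))
    (hkey : ∀ s ∈ ds, ∀ q ∈ G s, q.2 = s)
    (hp : p.2 ∉ ds) :
    PySem.List.insertBy pvBf p (ds.flatMap G)
      = (PySem.List.insertBy pvBfI p.2 ds).flatMap (fun s => if s = p.2 then [p] else G s) := by
  induction ds with
  | nil => simp [PySem.List.insertBy]
  | cons d t ih =>
      have hdt : ∀ s ∈ t, s < d := fun s hs => List.rel_of_pairwise_cons hds hs
      have hpd : p.2 ≠ d := fun h => hp (h ▸ List.mem_cons_self)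
      have hpt : p.2 ∉ t := fun h => hp (List.mem_cons_of_mem _ h)
      by_cases hlt : d < p.2
      · -- p goes in front of everything
        have h2 : ∀ y ∈ (d :: t).flatMap G, pvBf p y = true := by
          intro y hy
          obtain ⟨s, hs, hys⟩ := List.mem_flatMap.1 hy
          have h3 := hkey s hs y hys
          rcases List.mem_cons.1 hs with h | h
          · simp [pvBf, h3, h]; omega
          · have := hdt s h; simp [pvBf, h3]; omega
        rw [pv_insertBy_front _ _ _ h2]
        have hins : PySem.List.insertBy pvBfI p.2 (d :: t) = p.2 :: d :: t := by
          simp [PySem.List.insertBy, pvBfI, hlt]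
        rw [hins]
        have hfm : (p.2 :: d :: t).flatMap (fun s => if s = p.2 then [p] else G s)
            = p :: (d :: t).flatMap (fun s => if s = p.2 then [p] else G s) := by
          simp
        rw [hfm]
        have h3 : (d :: t).flatMap (fun s => if s = p.2 then [p] else G s) = (d :: t).flatMap G := by
          apply List.flatMap_congr
          intro s hs
          rcases List.mem_cons.1 hs with h | h
          · subst h; rw [if_neg (show ¬ s = p.2 from fun e => hpd (Eq.symm e))]
          · rw [if_neg (show ¬ s = p.2 from fun e => hpt (e ▸ h))]
        rw [h3]
      · have hgt : p.2 < d := lt_of_le_of_ne (not_lt.1 hlt) hpd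
        have h1 : ∀ y ∈ G d, pvBf p y = false := by
          intro y hy
          have h2 := hkey d (by simp) y hy
          simp [pvBf, h2]; omega
        have hins : PySem.List.insertBy pvBfI p.2 (d :: t) = d :: PySem.List.insertBy pvBfI p.2 t := by
          simp [PySem.List.insertBy, pvBfI]; omega
        simp only [List.flatMap_cons]
        rw [pv_insertBy_skip _ _ _ _ h1, hins]
        simp only [List.flatMap_cons, if_neg (show ¬ d = p.2 from fun e => hpd (Eq.symm e))]
        rw [ih (hds.sublist (List.sublist_cons_self d t)) (fun s hs => hkey s (by simp [hs])) hpt]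

theorem pvD_snoc (xs : List (String × Int)) (p : String × Int) :
    pvD (xs ++ [p]) = if p.2 ∈ xs.map Prod.snd then pvD xs
                      else PySem.List.insertBy pvBfI p.2 (pvD xs) := by
  have hset : PySem.List.dedup ((xs ++ [p]).map Prod.snd)
      = if p.2 ∈ xs.map Prod.snd then PySem.List.dedup (xs.map Prod.snd)
        else PySem.List.dedup (xs.map Prod.snd) ++ [p.2] := by
    simp only [List.map_append, List.map_cons, List.map_nil, PySem.List.dedup,
      PySem.Set.ofList_eq_foldl, List.foldl_append, List.foldl_cons, List.foldl_nil]
    rw [show (List.foldl PySem.Set.add [] (xs.map Prod.snd)) = PySem.Set.ofList (xs.map Prod.snd) from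
      (PySem.Set.ofList_eq_foldl _).symm]
    by_cases hm : p.2 ∈ xs.map Prod.snd
    · rw [if_pos hm, PySem.Set.add, if_pos]
      simp [PySem.Set.contains, PySem.Set.mem_ofList, hm]
    · rw [if_neg hm, PySem.Set.add, if_neg]
      simp [PySem.Set.contains, PySem.Set.mem_ofList, hm]
  unfold pvD
  rw [hset]
  by_cases hm : p.2 ∈ xs.map Prod.snd
  · rw [if_pos hm, if_pos hm]
  · rw [if_neg hm, if_neg hm,
      PySem.List.sorted_rev_eq_foldl_insertBy, PySem.List.sorted_rev_eq_foldl_insertBy,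
      List.foldl_append]
    rfl

theorem pvD_nodup (xs : List (String × Int)) : (pvD xs).Nodup := by
  have h := PySem.List.sorted_perm (PySem.List.dedup (xs.map Prod.snd)) (fun s => s) true
  exact h.nodup_iff.2 (PySem.Set.nodup_ofList _)

theorem pvD_pairwise (xs : List (String × Int)) : (pvD xs).Pairwise (· > ·) := by
  have h1 := PySem.List.sorted_pairwise_rev (PySem.List.dedup (xs.map Prod.snd)) (fun s => s)
  have h2 : (pvD xs).Pairwise (· ≠ ·) := pvD_nodup xs
  exact (h1.and h2).imp (fun h => lt_of_le_of_ne h.1 (fun e => h.2 e.symm))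

theorem pvD_mem (xs : List (String × Int)) (s : Int) : s ∈ pvD xs ↔ s ∈ xs.map Prod.snd := by
  rw [show pvD xs = PySem.List.sorted (PySem.List.dedup (xs.map Prod.snd)) (fun s => s) true from rfl]
  rw [(PySem.List.sorted_perm _ _ _).mem_iff]
  exact PySem.Set.mem_ofList _ _

theorem pvG_append (xs : List (String × Int)) (p : String × Int) (s : Int) :
    pvG (xs ++ [p]) s = pvG xs s ++ if p.2 = s then [p] else [] := by
  unfold pvG
  rw [List.filter_append]
  congr 1
  by_cases h : p.2 = s <;> simp [h]

theorem pvG_key (xs : List (String × Int)) (s : Int) : ∀ q ∈ pvG xs s, q.2 = s := by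
  intro q hq
  have := List.of_mem_filter hq
  simpa using this

theorem pvG_ne_nil (xs : List (String × Int)) (s : Int) (h : s ∈ xs.map Prod.snd) :
    pvG xs s ≠ [] := by
  obtain ⟨q, hq, he⟩ := List.mem_map.1 h
  have : q ∈ pvG xs s := List.mem_filter.2 ⟨hq, by simp [he]⟩
  exact List.ne_nil_of_mem this

theorem pvG_nil (xs : List (String × Int)) (s : Int) (h : s ∉ xs.map Prod.snd) :
    pvG xs s = [] := by
  unfold pvG
  rw [List.filter_eq_nil_iff]
  intro q hq
  simp only [beq_iff_eq]
  exact fun e => h (List.mem_map.2 ⟨q, hq, e⟩)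

theorem pv_sorted_eq_flatMap (xs : List (String × Int)) :
    PySem.List.sorted xs (fun x => x.2) true = (pvD xs).flatMap (pvG xs) := by
  induction xs using List.reverseRecOn with
  | nil => rfl
  | append_singleton xs p ih =>
      have hstep : PySem.List.sorted (xs ++ [p]) (fun x => x.2) true
          = PySem.List.insertBy pvBf p (PySem.List.sorted xs (fun x => x.2) true) := by
        rw [PySem.List.sorted_rev_eq_foldl_insertBy, PySem.List.sorted_rev_eq_foldl_insertBy,
          List.foldl_append]
        rfl
      rw [hstep, ih, pvD_snoc]
      by_cases hm : p.2 ∈ xs.map Prod.snd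
      · rw [if_pos hm]
        rw [pv_core_mem (pvD xs) (pvG xs) p (pvD_pairwise xs) (fun s _ => pvG_key xs s)
          ((pvD_mem xs p.2).2 hm)]
        apply List.flatMap_congr
        intro s hs
        rw [pvG_append]
        by_cases h : s = p.2
        · rw [if_pos h, if_pos h.symm]
        · rw [if_neg h, if_neg (fun e => h e.symm)]
          simp
      · rw [if_neg hm]
        rw [pv_core_new (pvD xs) (pvG xs) p (pvD_pairwise xs) (fun s _ => pvG_key xs s)
          (fun h => hm ((pvD_mem xs p.2).1 h))]
        apply List.flatMap_congr
        intro s hs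
        rw [pvG_append]
        by_cases h : s = p.2
        · rw [if_pos h, if_pos h.symm]
          rw [h, pvG_nil xs p.2 hm]
          simp
        · rw [if_neg h, if_neg (fun e => h e.symm)]
          simp

theorem pv_contains_mk_append (l1 l2 : List (String × String)) (k : String) :
    (PySem.Dict.mk (l1 ++ l2) : PySem.Dict String String).contains k
      = ((PySem.Dict.mk l1 : PySem.Dict String String).contains k
          || (PySem.Dict.mk l2 : PySem.Dict String String).contains k) := by
  simp [PySem.Dict.contains, List.any_append]

theorem pv_foldl_insert_items (l : List (String × Int)) (f : String × Int → String)
    (cm : PySem.Dict String String)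
    (hfresh : ∀ q ∈ l, cm.contains q.1 = false) (hnd : (l.map Prod.fst).Nodup) :
    (l.foldl (fun cm p => cm.insert p.1 (f p)) cm).items
      = cm.items ++ l.map (fun p => (p.1, f p)) := by
  induction l generalizing cm with
  | nil => simp
  | cons q t ih =>
      have hnd' : q.1 ∉ t.map Prod.fst ∧ (t.map Prod.fst).Nodup := by
        rw [List.map_cons, List.nodup_cons] at hnd; exact hnd
      have h0 : cm.insert q.1 (f q) = PySem.Dict.mk (cm.items ++ [(q.1, f q)]) := by
        rw [PySem.Dict.insert, if_neg]
        rw [hfresh q List.mem_cons_self]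
        simp
      rw [List.foldl_cons, h0, ih]
      · simp
      · intro r hr
        rw [pv_contains_mk_append]
        have h1 : (PySem.Dict.mk cm.items : PySem.Dict String String).contains r.1 = false :=
          hfresh r (List.mem_cons_of_mem _ hr)
        have h2 : q.1 ≠ r.1 := fun e => hnd'.1 (e ▸ List.mem_map.2 ⟨r, hr, rfl⟩)
        rw [h1]
        simp [PySem.Dict.contains, h2]
      · exact hnd'.2

theorem pv_foldl_insert_items_str (l : List String) (c : String)
    (cm : PySem.Dict String String)
    (hfresh : ∀ o ∈ l, cm.contains o = false) (hnd : l.Nodup) :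
    (l.foldl (fun cm o => cm.insert o c) cm).items
      = cm.items ++ l.map (fun o => (o, c)) := by
  induction l generalizing cm with
  | nil => simp
  | cons q t ih =>
      have h0 : cm.insert q c = PySem.Dict.mk (cm.items ++ [(q, c)]) := by
        rw [PySem.Dict.insert, if_neg]
        rw [hfresh q List.mem_cons_self]
        simp
      rw [List.foldl_cons, h0, ih]
      · simp
      · intro r hr
        rw [pv_contains_mk_append]
        have h1 : (PySem.Dict.mk cm.items : PySem.Dict String String).contains r = false :=
          hfresh r (List.mem_cons_of_mem _ hr)
        have h2 : q ≠ r := fun e => (List.nodup_cons.1 hnd).1 (e ▸ hr)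
        rw [h1]
        simp [PySem.Dict.contains, h2]
      · exact (List.nodup_cons.1 hnd).2

theorem pvBuckets_snoc (xs : List (String × Int)) (p : String × Int) :
    pvBuckets (xs ++ [p])
      = (pvBuckets xs).insert p.2 ((pvBuckets xs).getD p.2 [] ++ [p.1]) := by
  unfold pvBuckets
  rw [List.foldl_append]
  rfl

theorem pv_keys_insert {ν : Type} (b : PySem.Dict Int ν) (k : Int) (v : ν) :
    (b.insert k v).keys = if k ∈ b.keys then b.keys else b.keys ++ [k] := by
  rw [PySem.Dict.insert]
  by_cases hm : k ∈ b.keys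
  · rw [if_pos, if_pos hm]
    · show (b.items.map _).map Prod.fst = b.items.map Prod.fst
      rw [List.map_map]
      apply List.map_congr_left
      intro a _
      by_cases h : (a.1 == k) <;> simp_all
    · obtain ⟨q, hq, he⟩ := List.mem_map.1 hm
      exact List.any_eq_true.2 ⟨q, hq, by simp [he]⟩
  · rw [if_neg, if_neg hm]
    · simp [PySem.Dict.keys]
    · simp only [PySem.Dict.contains, List.any_eq_true]
      rintro ⟨q, hq, he⟩
      exact hm (List.mem_map.2 ⟨q, hq, by simpa using he⟩)

theorem pvBuckets_keys (xs : List (String × Int)) :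
    (pvBuckets xs).keys = PySem.List.dedup (xs.map Prod.snd) := by
  induction xs using List.reverseRecOn with
  | nil => rfl
  | append_singleton xs p ih =>
      rw [pvBuckets_snoc, pv_keys_insert, ih]
      have hset : PySem.List.dedup ((xs ++ [p]).map Prod.snd)
          = if p.2 ∈ xs.map Prod.snd then PySem.List.dedup (xs.map Prod.snd)
            else PySem.List.dedup (xs.map Prod.snd) ++ [p.2] := by
        simp only [List.map_append, List.map_cons, List.map_nil, PySem.List.dedup,
          PySem.Set.ofList_eq_foldl, List.foldl_append, List.foldl_cons, List.foldl_nil]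
        rw [show (List.foldl PySem.Set.add [] (xs.map Prod.snd)) = PySem.Set.ofList (xs.map Prod.snd) from
          (PySem.Set.ofList_eq_foldl _).symm]
        by_cases hm : p.2 ∈ xs.map Prod.snd
        · rw [if_pos hm, PySem.Set.add, if_pos]
          simp [PySem.Set.contains, PySem.Set.mem_ofList, hm]
        · rw [if_neg hm, PySem.Set.add, if_neg]
          simp [PySem.Set.contains, PySem.Set.mem_ofList, hm]
      rw [hset]
      by_cases hm : p.2 ∈ xs.map Prod.snd
      · rw [if_pos hm, if_pos]
        rw [PySem.List.dedup, PySem.Set.mem_ofList]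
        exact hm
      · rw [if_neg hm, if_neg]
        rw [PySem.List.dedup, PySem.Set.mem_ofList]
        exact hm

theorem pvBuckets_getD (xs : List (String × Int)) (s : Int) :
    (pvBuckets xs).getD s [] = (pvG xs s).map Prod.fst := by
  induction xs using List.reverseRecOn with
  | nil => rfl
  | append_singleton xs p ih =>
      rw [pvBuckets_snoc, PySem.Dict.getD_insert, pvG_append]
      by_cases h : s = p.2
      · subst h
        rw [if_pos rfl, if_pos rfl, ih]
        simp
      · rw [if_neg h, if_neg (fun e => h e.symm), ih]
        simp

theorem pv_enum_flatMap_eq {α β : Type} (l : List α) (F : Int → α → List β) (F' : α → List β) :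
    ∀ (s : Int), (∀ i (hi : i < l.length), F ((i : Int) + s) l[i] = F' l[i]) →
    (PySem.List.enumerate l s).flatMap (fun is => F is.1 is.2) = l.flatMap F' := by
  induction l with
  | nil => intro s _; rfl
  | cons a t ih =>
      intro s h
      rw [PySem.List.enumerate_cons]
      simp only [List.flatMap_cons]
      congr 1
      · have := h 0 (by simp)
        simpa using this
      · apply ih
        intro i hi
        have := h (i + 1) (by simpa using Nat.succ_lt_succ hi)
        simpa [add_assoc, add_comm, add_left_comm] using this

theorem pv_outer (es : List (Int × Int)) (B : Int → List String) (C : Int → String)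
    (cm : PySem.Dict String String)
    (hnd : (es.flatMap (fun is => B is.2)).Nodup)
    (hfresh : ∀ is ∈ es, ∀ o ∈ B is.2, cm.contains o = false) :
    (es.foldl (fun cm is => (B is.2).foldl (fun cm o => cm.insert o (C is.1)) cm) cm).items
      = cm.items ++ es.flatMap (fun is => (B is.2).map (fun o => (o, C is.1))) := by
  induction es generalizing cm with
  | nil => simp
  | cons d t ih =>
      rw [List.foldl_cons]
      have hndh : (B d.2).Nodup := ((List.nodup_append.1 (by simpa using hnd)).1)
      have hdisj : ∀ o ∈ t.flatMap (fun is => B is.2), o ∉ B d.2 := by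
        intro o ho hc
        exact absurd rfl ((List.nodup_append.1 (by simpa using hnd)).2.2 o hc o ho)
      have h1 := pv_foldl_insert_items_str (B d.2) (C d.1) cm
        (hfresh d List.mem_cons_self) hndh
      rw [ih _ ((List.nodup_append.1 (by simpa using hnd)).2.1)]
      · rw [h1]
        simp
      · intro is his o ho
        have hcm' : (B d.2).foldl (fun cm o => cm.insert o (C d.1)) cm
            = PySem.Dict.mk (cm.items ++ (B d.2).map (fun o => (o, C d.1))) := by
          cases hcm : (B d.2).foldl (fun cm o => cm.insert o (C d.1)) cm with
          | mk items => rw [← h1, hcm]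
        rw [hcm', pv_contains_mk_append]
        have h2 : (PySem.Dict.mk cm.items : PySem.Dict String String).contains o = false :=
          hfresh is (List.mem_cons_of_mem _ his) o ho
        rw [h2]
        have h3 : o ∉ B d.2 := hdisj o (List.mem_flatMap.2 ⟨is, his, ho⟩)
        simp only [Bool.false_or, PySem.Dict.contains]
        rw [List.any_eq_false]
        intro q hq
        obtain ⟨o', ho', rfl⟩ := List.mem_map.1 hq
        simp only [beq_iff_eq]
        exact fun e => h3 (e ▸ ho')

def pvColorA (xs : List (String × Int)) (s : Int) : String :=
  if (PySem.List.pyGet? (PySem.List.sorted xs (fun x => x.2) true) 0).map (fun q => q.2) == some s then "green"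
  else if (PySem.List.pyGet? (PySem.List.sorted xs (fun x => x.2) true) (-1)).map (fun q => q.2) == some s then "red"
  else "orange"

theorem pv_pyGet_zero {α : Type} (l : List α) : PySem.List.pyGet? l 0 = l.head? := by
  cases l with
  | nil => rfl
  | cons a t =>
      simp only [PySem.List.pyGet?, PySem.List.pyIdx?]
      rw [if_pos le_rfl, if_pos (by exact_mod_cast Nat.succ_pos t.length)]
      rfl

theorem pv_pyGet_last {α : Type} (l : List α) : PySem.List.pyGet? l (-1) = l.getLast? := by
  rcases eq_or_ne l [] with rfl | h
  · rfl
  · have hp : 0 < l.length := List.length_pos_of_ne_nil h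
    simp only [PySem.List.pyGet?, PySem.List.pyIdx?]
    rw [if_neg (by omega), if_pos (by omega)]
    have he : (-(-1 : Int)).toNat = 1 := rfl
    simp only [Option.bind]
    rw [he, List.getLast?_eq_getElem?]


theorem pv_main (xs : List (String × Int)) (hpre : (xs.map Prod.fst).Nodup) :
    get_color_map xs = get_color_map_alt xs := by
  rcases eq_or_ne xs [] with rfl | hne0
  · rfl
  -- notation
  have hso := pv_sorted_eq_flatMap xs
  have hperm := PySem.List.sorted_perm xs (fun x => x.2) true
  have hndso : ((PySem.List.sorted xs (fun x => x.2) true).map Prod.fst).Nodup :=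
    ((hperm.map Prod.fst).nodup_iff).2 hpre
  -- A side
  have hbody : (fun (color_map : PySem.Dict String String) (p : String × Int) =>
      if (PySem.List.pyGet? (PySem.List.sorted xs (fun x => x.2) true) 0).map (fun q => q.2) == some p.2 then
        color_map.insert p.1 "green"
      else if (PySem.List.pyGet? (PySem.List.sorted xs (fun x => x.2) true) (-1)).map (fun q => q.2) == some p.2 then
        color_map.insert p.1 "red"
      else
        color_map.insert p.1 "orange")
      = (fun (color_map : PySem.Dict String String) (p : String × Int) =>
          color_map.insert p.1 (pvColorA xs p.2)) := by
    funext cm p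
    simp only [pvColorA]
    split_ifs <;> rfl
  have hA : get_color_map xs
      = (PySem.List.sorted xs (fun x => x.2) true).map (fun p => (p.1, pvColorA xs p.2)) := by
    have h1 : get_color_map xs
        = ((PySem.List.sorted xs (fun x => x.2) true).foldl
            (fun (color_map : PySem.Dict String String) (p : String × Int) =>
              if (PySem.List.pyGet? (PySem.List.sorted xs (fun x => x.2) true) 0).map (fun q => q.2) == some p.2 then
                color_map.insert p.1 "green"
              else if (PySem.List.pyGet? (PySem.List.sorted xs (fun x => x.2) true) (-1)).map (fun q => q.2) == some p.2 then
                color_map.insert p.1 "red"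
              else
                color_map.insert p.1 "orange") (PySem.Dict.mk [])).items := rfl
    rw [h1, hbody, pv_foldl_insert_items _ _ _ (fun q _ => rfl) hndso]
    rfl
  -- B side
  have hne' : pvD xs ≠ [] := by
    intro h
    obtain ⟨p, hp⟩ := List.exists_mem_of_ne_nil xs hne0
    have hm : p.2 ∈ pvD xs := (pvD_mem xs p.2).2 (List.mem_map.2 ⟨p, hp, rfl⟩)
    rw [h] at hm
    cases hm
  have hsone : PySem.List.sorted xs (fun x => x.2) true ≠ [] := by
    rw [Ne, PySem.List.sorted_eq_nil_iff]; exact hne0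
  have hBkeys : PySem.List.sorted (pvBuckets xs).keys (fun s => s) true = pvD xs := by
    rw [pvBuckets_keys]; rfl
  have hfm0 : (PySem.List.enumerate (pvD xs) 0).flatMap (fun is => (pvBuckets xs).getD is.2 [])
      = ((pvD xs).flatMap (pvG xs)).map Prod.fst := by
    rw [pv_enum_flatMap_eq (pvD xs) (fun _ a => (pvBuckets xs).getD a [])
      (fun a => (pvBuckets xs).getD a []) 0 (fun i hi => rfl)]
    rw [List.map_flatMap]
    apply List.flatMap_congr
    intro s _
    rw [pvBuckets_getD]
  have hndB : ((PySem.List.enumerate (pvD xs) 0).flatMap (fun is => (pvBuckets xs).getD is.2 [])).Nodup := by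
    rw [hfm0, ← hso]
    exact hndso
  have hB : get_color_map_alt xs
      = (PySem.List.enumerate (pvD xs) 0).flatMap
          (fun is => ((pvBuckets xs).getD is.2 []).map
            (fun o => (o, if is.1 = 0 then "green"
                          else if is.1 = ((pvD xs).length : Int) - 1 then "red" else "orange"))) := by
    have h1 : get_color_map_alt xs
        = ((PySem.List.enumerate (PySem.List.sorted (pvBuckets xs).keys (fun s => s) true)).foldl
            (fun (cm : PySem.Dict String String) is =>
              ((pvBuckets xs).getD is.2 []).foldl
                (fun cm o => cm.insert o
                  (if is.1 = 0 then "green"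
                   else if is.1 = ((PySem.List.sorted (pvBuckets xs).keys (fun s => s) true).length : Int) - 1 then "red"
                   else "orange")) cm)
            (PySem.Dict.mk [])).items := rfl
    rw [h1]
    simp only [hBkeys]
    rw [pv_outer (PySem.List.enumerate (pvD xs) 0) (fun s => (pvBuckets xs).getD s [])
      (fun i => if i = 0 then "green" else if i = ((pvD xs).length : Int) - 1 then "red" else "orange")
      (PySem.Dict.mk []) hndB (fun _ _ _ _ => rfl)]
    simp
  -- head and last score facts
  have hp0 : 0 < (pvD xs).length := List.length_pos_of_ne_nil hne'
  have hcons : pvD xs = (pvD xs).head hne' :: (pvD xs).tail := (List.cons_head_tail hne').symm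
  have hheadso : ((PySem.List.sorted xs (fun x => x.2) true).head?).map (fun q => q.2)
      = some ((pvD xs)[0]'hp0) := by
    have hd_mem : (pvD xs).head hne' ∈ pvD xs := List.head_mem hne'
    have hGne : pvG xs ((pvD xs).head hne') ≠ [] :=
      pvG_ne_nil xs _ ((pvD_mem xs _).1 hd_mem)
    have h2 : (PySem.List.sorted xs (fun x => x.2) true).head?
        = (pvG xs ((pvD xs).head hne')).head? := by
      rw [hso]
      conv_lhs => rw [hcons]
      rw [List.flatMap_cons, List.head?_append_of_ne_nil _ hGne]
    rw [h2, List.head?_eq_some_head hGne]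
    simp only [Option.map_some]
    congr 1
    rw [pvG_key xs _ _ (List.head_mem hGne)]
    rw [List.getElem_zero_eq_head hp0]
  have hlastso : ((PySem.List.sorted xs (fun x => x.2) true).getLast?).map (fun q => q.2)
      = some ((pvD xs)[(pvD xs).length - 1]'(by omega)) := by
    have hdl_mem : (pvD xs).getLast hne' ∈ pvD xs := List.getLast_mem hne'
    have hGne : pvG xs ((pvD xs).getLast hne') ≠ [] :=
      pvG_ne_nil xs _ ((pvD_mem xs _).1 hdl_mem)
    have h2 : (PySem.List.sorted xs (fun x => x.2) true).getLast?
        = (pvG xs ((pvD xs).getLast hne')).getLast? := by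
      rw [hso]
      conv_lhs => rw [(List.dropLast_concat_getLast hne').symm]
      rw [List.flatMap_append]
      simp only [List.flatMap_cons, List.flatMap_nil, List.append_nil]
      rw [List.getLast?_append_of_ne_nil _ hGne]
    rw [h2, List.getLast?_eq_some_getLast hGne]
    simp only [Option.map_some]
    congr 1
    rw [pvG_key xs _ _ (List.getLast_mem hGne)]
    rw [List.getLast_eq_getElem hne']
  -- final comparison
  rw [hA, hB, hso, List.map_flatMap]
  symm
  apply pv_enum_flatMap_eq (pvD xs)
    (fun i a => ((pvBuckets xs).getD a []).map
      (fun o => (o, if i = 0 then "green"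
                    else if i = ((pvD xs).length : Int) - 1 then "red" else "orange")))
  intro i hi
  rw [pvBuckets_getD, List.map_map]
  have hcol : (if ((i : Int) + 0) = 0 then "green"
               else if ((i : Int) + 0) = ((pvD xs).length : Int) - 1 then "red" else "orange")
      = pvColorA xs ((pvD xs)[i]'hi) := by
    unfold pvColorA
    rw [pv_pyGet_zero, pv_pyGet_last, hheadso, hlastso]
    have hinj0 := (pvD_nodup xs).getElem_inj_iff (hi := hp0) (hj := hi)
    have hinjL := (pvD_nodup xs).getElem_inj_iff
      (hi := (by omega : (pvD xs).length - 1 < (pvD xs).length)) (hj := hi)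
    simp only [beq_iff_eq, Option.some.injEq]
    simp only [hinj0, hinjL]
    split_ifs <;> first | rfl | (exfalso; omega)
  rw [hcol]
  apply List.map_congr_left
  intro p hp
  show (p.1, pvColorA xs ((pvD xs)[i]'hi)) = (p.1, pvColorA xs p.2)
  rw [pvG_key xs _ p hp]

-- ===== VERDICT (by name: the statement is the Claim_ definition above) =====
theorem get_color_map_spec : Claim_equal_get_color_map := by
  intro xs _ hpre
  unfold Spec_get_color_map
  exact pv_main xs hpre
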